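-- pv_equiv track=rewrite | github.com/lamm-mit/scienceclaw | skills/minerals-news-monitor/scripts/news_monitor.py | _policy_signal
-- ===== SOURCE A (Python) =====
-- from typing import Dict, List, Optional, Sequence, Tuple
--
-- POLICY_SIGNALS: Dict[str, Sequence[str]] = {
--     "export_ban": ["export ban", "ban exports", "shipment ban"],
--     "export_quota": ["export quota", "quota"],
--     "export_license": ["export license", "licensing requirement"],
--     "tariff": ["tariff", "duty"],
--     "sanctions": ["sanction", "embargo"],
--     "subsidy": ["subsidy", "tax credit", "incentive"],
--     "investment": ["investment", "financing", "grant", "loan"],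
--     "mine_permitting": ["permit", "permitting", "environmental review"],
-- }
--
-- def _policy_signal(text: str) -> Optional[str]:
--     haystack = text.lower()
--     scores: List[Tuple[int, str]] = []
--     for signal, keywords in POLICY_SIGNALS.items():
--         score = sum(1 for k in keywords if k in haystack)
--         if score > 0:
--             scores.append((score, signal))
--     if not scores:
--         return None
--     scores.sort(reverse=True)
--     return scores[0][1]
-- ===== SOURCE B (Python) =====
-- from typing import Dict, Optional, Sequence
--
-- POLICY_SIGNALS: Dict[str, Sequence[str]] = {
--     "export_ban": ["export ban", "ban exports", "shipment ban"],
--     "export_quota": ["export quota", "quota"],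
--     "export_license": ["export license", "licensing requirement"],
--     "tariff": ["tariff", "duty"],
--     "sanctions": ["sanction", "embargo"],
--     "subsidy": ["subsidy", "tax credit", "incentive"],
--     "investment": ["investment", "financing", "grant", "loan"],
--     "mine_permitting": ["permit", "permitting", "environmental review"],
-- }
--
-- def _policy_signal(text: str) -> Optional[str]:
--     haystack = text.lower()
--     best = None  # running best (score, signal) pair; replaces list + sort
--     for sig, keywords in POLICY_SIGNALS.items():
--         score = sum(1 for k in keywords if k in haystack)
--         if score > 0:
--             if best is None or (score, sig) > best:
--                 best = (score, sig)
--     return best[1] if best is not None else None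
-- ===== Notes on version B (the rewrite author's own statement) =====
-- stated objective: simpler
-- what changed: Replaces the build-a-list-then-sort(reverse=True) selection with a single running-best (score, signal) pair updated on strict tuple-greater, returning its signal (or None); no intermediate list and no sort.
import Mathlib
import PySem

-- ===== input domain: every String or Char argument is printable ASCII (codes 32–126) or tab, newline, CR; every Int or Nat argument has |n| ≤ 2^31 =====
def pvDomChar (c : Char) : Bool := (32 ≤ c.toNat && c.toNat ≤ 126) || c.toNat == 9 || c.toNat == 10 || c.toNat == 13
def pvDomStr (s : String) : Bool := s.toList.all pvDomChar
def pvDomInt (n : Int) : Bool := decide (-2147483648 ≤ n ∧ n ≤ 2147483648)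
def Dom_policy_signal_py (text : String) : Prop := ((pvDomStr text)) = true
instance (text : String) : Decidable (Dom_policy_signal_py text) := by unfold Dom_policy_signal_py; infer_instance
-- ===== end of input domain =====

-- B replaces A's build-list-then-sort(reverse=True) selection by a single running-best (score, signal)
-- pass (objective: simpler); A sorts only a local list, so no caller-visible mutation is involved.
-- ===== PORT A =====
def POLICY_SIGNALS : List (String × List String) :=
  [("export_ban", ["export ban", "ban exports", "shipment ban"]),
   ("export_quota", ["export quota", "quota"]),
   ("export_license", ["export license", "licensing requirement"]),
   ("tariff", ["tariff", "duty"]),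
   ("sanctions", ["sanction", "embargo"]),
   ("subsidy", ["subsidy", "tax credit", "incentive"]),
   ("investment", ["investment", "financing", "grant", "loan"]),
   ("mine_permitting", ["permit", "permitting", "environmental review"])]

-- score = sum(1 for k in keywords if k in haystack)   (same line in A and B)
def pvScore (haystack : String) (kws : List String) : Int :=
  kws.foldl (fun s k => if PySem.Str.isIn k haystack then s + 1 else s) 0

def policy_signal_py (text : String) : Option String :=
  let haystack := PySem.Str.lower text
  let scores : List (Int × String) :=
    POLICY_SIGNALS.foldl (fun acc sk =>
      if pvScore haystack sk.2 > 0 then acc ++ [(pvScore haystack sk.2, sk.1)] else acc) []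
  if scores = [] then none
  else (PySem.List.pyGet? (PySem.List.sorted2 scores Prod.fst Prod.snd true) 0).map Prod.snd

-- ===== PORT B =====
def policy_signal_py_alt (text : String) : Option String :=
  let haystack := PySem.Str.lower text
  let best : Option (Int × String) :=
    POLICY_SIGNALS.foldl (fun best sk =>
      if pvScore haystack sk.2 > 0 then
        match best with
        | none => some (pvScore haystack sk.2, sk.1)
        | some b =>
            if b.1 < pvScore haystack sk.2 ∨ (pvScore haystack sk.2 = b.1 ∧ b.2 < sk.1)
            then some (pvScore haystack sk.2, sk.1) else some b
      else best) none
  best.map Prod.snd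

-- ===== PRECONDITION & SPEC =====
def Spec_policy_signal_py (text : String) (out : Option String) : Prop := out = policy_signal_py_alt text
instance (text : String) (out : Option String) : Decidable (Spec_policy_signal_py text out) := by unfold Spec_policy_signal_py; infer_instance

-- ===== CLAIM (what is proved, stated in full; the proofs are below) =====
def Claim_equal_policy_signal_py : Prop := ∀ (text : String), Dom_policy_signal_py text → Spec_policy_signal_py text (policy_signal_py text)

-- ===== LEMMAS AND PROOFS =====

-- "before" relation that sorted2 (keys fst, snd; reverse=True) inserts with
def pvLexBefore (x y : Int × String) : Bool :=
  decide (y.1 < x.1) || (!decide (x.1 < y.1) && decide (y.2 < x.2))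

-- running-best step on the head of the accumulator
def pvStep (b : Option (Int × String)) (x : Int × String) : Option (Int × String) :=
  match b with
  | none => some x
  | some h => if pvLexBefore x h then some x else some h

lemma pvHead_insertBy (x : Int × String) (acc : List (Int × String)) :
    (PySem.List.insertBy pvLexBefore x acc).head? = pvStep acc.head? x := by
  cases acc with
  | nil => simp [PySem.List.insertBy, pvStep]
  | cons y ys =>
      simp only [PySem.List.insertBy, pvStep, List.head?_cons]
      split <;> simp_all

lemma pvFold_insertBy (l : List (Int × String)) (acc : List (Int × String)) :
    (l.foldl (fun a x => PySem.List.insertBy pvLexBefore x a) acc).head? =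
    l.foldl pvStep acc.head? := by
  induction l generalizing acc with
  | nil => rfl
  | cons x t ih => simp only [List.foldl_cons, ih, pvHead_insertBy]

lemma pvSorted2_head (l : List (Int × String)) :
    (PySem.List.sorted2 l Prod.fst Prod.snd true).head? = l.foldl pvStep none := by
  have h : PySem.List.sorted2 l Prod.fst Prod.snd true =
      l.foldl (fun a x => PySem.List.insertBy pvLexBefore x a) [] := rfl
  rw [h, pvFold_insertBy]; rfl

lemma pvGt_iff (x h : Int × String) :
    pvLexBefore x h = true ↔ (h.1 < x.1 ∨ (x.1 = h.1 ∧ h.2 < x.2)) := by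
  rcases lt_trichotomy h.1 x.1 with hc | hc | hc <;>
    simp [pvLexBefore, hc, not_lt_of_gt] <;> omega

lemma pvPyGet?_zero (l : List (Int × String)) (h : l ≠ []) :
    PySem.List.pyGet? l 0 = l.head? := by
  cases l with
  | nil => simp at h
  | cons a t => simp [PySem.List.pyGet?, PySem.List.pyIdx?]

lemma pvSorted2_ne_nil (l : List (Int × String)) (h : l ≠ []) :
    PySem.List.sorted2 l Prod.fst Prod.snd true ≠ [] := by
  intro hc
  have := PySem.List.sorted2_perm l Prod.fst Prod.snd true
  rw [hc] at this
  exact h (this.nil_eq).symm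

-- ===== VERDICT (by name: the statement is the Claim_ definition above) =====
theorem policy_signal_py_spec : Claim_equal_policy_signal_py := by
  intro text _
  unfold Spec_policy_signal_py policy_signal_py policy_signal_py_alt
  set haystack := PySem.Str.lower text with hh
  -- name the per-signal test and value
  have hA : POLICY_SIGNALS.foldl (fun acc sk =>
      if pvScore haystack sk.2 > 0 then acc ++ [(pvScore haystack sk.2, sk.1)] else acc)
      ([] : List (Int × String)) =
      ((POLICY_SIGNALS.filter (fun sk => decide (pvScore haystack sk.2 > 0))).map
        (fun sk => (pvScore haystack sk.2, sk.1))) := by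
    simpa using PySem.List.foldl_append_ite (fun sk => pvScore haystack sk.2 > 0)
      (fun sk => (pvScore haystack sk.2, sk.1)) POLICY_SIGNALS ([] : List (Int × String))
  set scores := ((POLICY_SIGNALS.filter (fun sk => decide (pvScore haystack sk.2 > 0))).map
      (fun sk => (pvScore haystack sk.2, sk.1))) with hs
  -- B's loop is the running-best fold over the same scores list
  have hB : POLICY_SIGNALS.foldl (fun best sk =>
      if pvScore haystack sk.2 > 0 then
        (match best with
         | none => some (pvScore haystack sk.2, sk.1)
         | some b =>
             if b.1 < pvScore haystack sk.2 ∨ (pvScore haystack sk.2 = b.1 ∧ b.2 < sk.1)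
             then some (pvScore haystack sk.2, sk.1) else some b)
      else best) (none : Option (Int × String)) = scores.foldl pvStep none := by
    rw [PySem.List.foldl_ite_eq_foldl_filter (fun sk : String × List String => pvScore haystack sk.2 > 0)]
    rw [hs, List.foldl_map]
    refine PySem.List.foldl_congr_mem _ _ _ _ (fun b sk _ => ?_)
    cases b with
    | none => rfl
    | some h =>
        show _ = pvStep (some h) (pvScore haystack sk.2, sk.1)
        simp only [pvStep]
        by_cases hgt : h.1 < pvScore haystack sk.2 ∨ (pvScore haystack sk.2 = h.1 ∧ h.2 < sk.1)
        · rw [if_pos hgt, if_pos ((pvGt_iff _ h).2 hgt)]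
        · rw [if_neg hgt, if_neg (fun hc => hgt ((pvGt_iff _ h).1 hc))]
  simp only [hA, hB]
  by_cases hnil : scores = []
  · simp [hnil]
  · rw [if_neg hnil, pvPyGet?_zero _ (pvSorted2_ne_nil _ hnil), pvSorted2_head]
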